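-- pv_equiv track=rewrite | github.com/whqhdtq12346/nonogram_solver | main.py | exclude
-- ===== SOURCE A (Python) =====
-- def match_hint(hint, temp): # hint를 만족하는지 확인하는 함수
--     groups = []
--     count = 0
--     for entry in temp:
--         if entry == 1:
--             count += 1
--         elif count > 0:
--             groups.append(count)
--             count = 0
--     if count > 0:
--         groups.append(count)
--     return groups == hint
--
-- def solvable(hint, temp, length):
--     empty_list = [i for i in range(length) if temp[i] == 0]
--
--     def backtrack(index):
--         if index == len(empty_list):
--             return match_hint(hint, temp)
--
--         i = empty_list[index]
--         temp[i] = 1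
--         if backtrack(index + 1):
--             return True
--         temp[i] = -1
--         if backtrack(index + 1):
--             return True
--         return False
--
--     return backtrack(0)
--
-- def exclude(hint, temp, length):
--     empty_list = [i for i in range(length) if temp[i] == 0]
--     for i in empty_list:
--         temp2 = [e for e in temp]
--         temp2[i] = 1
--         if not solvable(hint, temp2, length):
--             temp[i] = -1
--             continue
--
--         temp2 = [e for e in temp]
--         temp2[i] = -1
--         if not solvable(hint, temp2, length):
--             temp[i] = 1
--             continue
--     return temp
-- ===== SOURCE B (Python) =====
-- # B: per-cell forcing as in A, but solvability decided by a different algorithm: a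
-- # suffix dynamic program over (position, hint index) instead of per-assignment backtracking.
-- # Like A, mutates temp in place and returns it.
-- def exclude(hint, temp, length):
--     n = len(temp)
--     H = len(hint)
--
--     def feasible(fix_i, fix_v):
--         # cell j is free iff j < length, temp[j] == 0 and j != fix_i;
--         # otherwise it is fixed at its value (fix_v at fix_i).
--         fill = []
--         blank = []
--         for j in range(n):
--             v = fix_v if j == fix_i else temp[j]
--             fr = j != fix_i and j < length and temp[j] == 0
--             fill.append(fr or v == 1)
--             blank.append(fr or v != 1)
--         # rows[d][k] == True  iff  cells j.. (j = current position + d) can be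
--         # completed so that their block structure is exactly hint[k:].
--         rows = [[k == H for k in range(H + 1)]]
--         for j in range(n - 1, -1, -1):
--             row = []
--             for k in range(H + 1):
--                 ok = blank[j] and rows[0][k]
--                 if not ok and k < H:
--                     h = hint[k]
--                     if 1 <= h <= n - j and all(fill[p] for p in range(j, j + h)):
--                         if h == n - j:
--                             ok = k + 1 == H
--                         else:
--                             ok = blank[j + h] and rows[h][k + 1]
--                 row.append(ok)
--             rows.insert(0, row)
--         return rows[0][0]
--
--     empty_list = [i for i in range(length) if temp[i] == 0]
--     for i in empty_list:
--         if not feasible(i, 1):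
--             temp[i] = -1
--         elif not feasible(i, -1):
--             temp[i] = 1
--     return temp
-- ===== Notes on version B (the rewrite author's own statement) =====
-- stated objective: alternative
-- what changed: Each per-cell solvability test is decided by a suffix dynamic program over (position, hint index) reachability instead of A's backtracking enumeration of all +-1 assignments of the empty cells.
import Mathlib
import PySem

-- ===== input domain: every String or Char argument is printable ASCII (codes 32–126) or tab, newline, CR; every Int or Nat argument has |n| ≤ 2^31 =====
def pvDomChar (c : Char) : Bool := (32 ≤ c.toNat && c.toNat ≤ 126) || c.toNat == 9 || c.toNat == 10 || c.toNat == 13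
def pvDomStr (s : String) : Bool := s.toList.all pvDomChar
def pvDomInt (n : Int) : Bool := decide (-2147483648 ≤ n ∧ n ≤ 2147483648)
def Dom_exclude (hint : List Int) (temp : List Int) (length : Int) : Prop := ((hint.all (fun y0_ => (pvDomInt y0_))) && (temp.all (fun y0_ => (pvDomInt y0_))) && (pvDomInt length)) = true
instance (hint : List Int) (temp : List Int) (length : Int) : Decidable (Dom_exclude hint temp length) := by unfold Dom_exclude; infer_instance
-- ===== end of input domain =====

-- B decides each per-cell solvability test by a suffix dynamic program over (position, hint index)
-- instead of A's backtracking enumeration of all +-1 assignments of the empty cells; like A it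
-- mutates temp in place (the equivalence is about the return value, which for both IS that list).

-- ===== PORT A =====
def pyGroups (temp : List Int) : List Int :=
  let st := temp.foldl (fun (st : List Int × Int) entry =>
      if entry = 1 then (st.1, st.2 + 1)
      else if st.2 > 0 then (st.1 ++ [st.2], 0)
      else st) (([] : List Int), (0 : Int))
  if st.2 > 0 then st.1 ++ [st.2] else st.1

def matchHint (hint temp : List Int) : Bool := decide (pyGroups temp = hint)

def btA (hint : List Int) : List Int → List Int → Bool × List Int
  | [], temp => (matchHint hint temp, temp)
  | i :: rest, temp =>
    let r := btA hint rest (PySem.List.pySetD temp i 1)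
    if r.1 then (true, r.2)
    else btA hint rest (PySem.List.pySetD r.2 i (-1))

def pyEmptyList (temp : List Int) (length : Int) : List Int :=
  (PySem.List.pyRange 0 length 1).filter (fun i => PySem.List.pyGetD temp i 0 == 0)

def pySolvable (hint temp : List Int) (length : Int) : Bool :=
  (btA hint (pyEmptyList temp length) temp).1

def exclude (hint : List Int) (temp : List Int) (length : Int) : List Int :=
  (pyEmptyList temp length).foldl (fun t i =>
    if !(pySolvable hint (PySem.List.pySetD t i 1) length) then PySem.List.pySetD t i (-1)
    else if !(pySolvable hint (PySem.List.pySetD t i (-1)) length) then PySem.List.pySetD t i 1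
    else t) temp

-- ===== PORT B =====
def feasCells (temp : List Int) (length fixI fixV : Int) : List (Bool × Bool) :=
  temp.zipIdx.map (fun ej =>
    let v := if (ej.2 : Int) = fixI then fixV else ej.1
    let fr := decide ((ej.2 : Int) ≠ fixI ∧ (ej.2 : Int) < length ∧ ej.1 = 0)
    (fr || decide (v = 1), fr || decide (v ≠ 1)))

def rowsB (hint : List Int) (H : Nat) : List (Bool × Bool) → List (List Bool)
  | [] => [(List.range (H + 1)).map (fun k => decide (k = H))]
  | c :: rest =>
    let prev := rowsB hint H rest
    let nj : Int := (rest.length : Int) + 1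
    let row := (List.range (H + 1)).map (fun k =>
      let ok := c.2 && ((prev.headD []).getD k false)
      if !ok && decide (k < H) then
        let h := PySem.List.pyGetD hint (k : Int) 0
        if decide (1 ≤ h) && decide (h ≤ nj) && (((c :: rest).take h.toNat).all (·.1)) then
          if h = nj then decide (k + 1 = H)
          else ((c :: rest).getD h.toNat (false, false)).2 && ((prev.getD h.toNat []).getD (k + 1) false)
        else false
      else ok)
    row :: prev

def feasible (hint temp : List Int) (length fixI fixV : Int) : Bool :=
  ((rowsB hint hint.length (feasCells temp length fixI fixV)).headD []).getD 0 false

def exclude_alt (hint : List Int) (temp : List Int) (length : Int) : List Int :=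
  let el := (PySem.List.pyRange 0 length 1).filter (fun i => PySem.List.pyGetD temp i 0 == 0)
  el.foldl (fun t i =>
    if !(feasible hint t length i 1) then PySem.List.pySetD t i (-1)
    else if !(feasible hint t length i (-1)) then PySem.List.pySetD t i 1
    else t) temp

-- ===== PRECONDITION & SPEC =====
-- Pre_: Python A evaluates temp[i] for every i in range(length) and raises IndexError when
-- length > len(temp); those inputs (where B raises too) are the only ones excluded.
def Pre_exclude (hint : List Int) (temp : List Int) (length : Int) : Prop :=
  length ≤ (temp.length : Int)
instance (hint : List Int) (temp : List Int) (length : Int) : Decidable (Pre_exclude hint temp length) := by unfold Pre_exclude; infer_instance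
def pvWitness_exclude : List Int × List Int × Int := ([2], [0, 0, 0], 3)

def Spec_exclude (hint : List Int) (temp : List Int) (length : Int) (out : List Int) : Prop := out = exclude_alt hint temp length
instance (hint : List Int) (temp : List Int) (length : Int) (out : List Int) : Decidable (Spec_exclude hint temp length out) := by unfold Spec_exclude; infer_instance

-- ===== CLAIM (what is proved, stated in full; the proofs are below) =====
def Claim_equal_exclude : Prop := ∀ (hint : List Int) (temp : List Int) (length : Int), Dom_exclude hint temp length → Pre_exclude hint temp length → Spec_exclude hint temp length (exclude hint temp length)

-- ===== LEMMAS AND PROOFS =====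

-- ---- proof-side vocabulary ----

/-- the one-pattern of an int list: which entries equal 1 -/
def ones (c : List Int) : List Bool := c.map (fun e => decide (e = 1))

def takeRun : List Bool → Nat × List Bool
  | [] => (0, [])
  | false :: r => (0, false :: r)
  | true :: r => ((takeRun r).1 + 1, (takeRun r).2)

theorem takeRun_len : ∀ r : List Bool, (takeRun r).2.length ≤ r.length := by
  intro r; induction r with
  | nil => simp [takeRun]
  | cons x r ih => cases x <;> simp [takeRun] <;> omega

/-- run lengths of `true`-blocks, as ints -/
def gb : List Bool → List Int
  | [] => []
  | false :: r => gb r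
  | true :: r => (((takeRun r).1 + 1 : Nat) : Int) :: gb (takeRun r).2
termination_by b => b.length
decreasing_by
  all_goals simp only [List.length_cons]
  · omega
  · exact Nat.lt_succ_of_le (takeRun_len r)

/-- a one-pattern is admissible for a cell list (fst = may be filled, snd = may be blank) -/
def Adm : List (Bool × Bool) → List Bool → Prop
  | [], [] => True
  | c :: cs, x :: b => (if x then c.1 else c.2) = true ∧ Adm cs b
  | _, _ => False

/-- "the cells admit a pattern with exactly these block lengths" -/
def Ex (cs : List (Bool × Bool)) (hs : List Int) : Prop := ∃ b, Adm cs b ∧ gb b = hs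

/-- cells of A's solvable instance: temp2, length -/
def cellsOfA (t2 : List Int) (length : Int) : List (Bool × Bool) :=
  t2.zipIdx.map (fun ej =>
    let fr := decide ((ej.2 : Int) < length ∧ ej.1 = 0)
    (fr || decide (ej.1 = 1), fr || decide (ej.1 ≠ 1)))

/-- reference recursion for A's backtracking (no mutation threading) -/
def bruteB (hint : List Int) : List Int → List Int → Bool
  | [], t => matchHint hint t
  | i :: rest, t => bruteB hint rest (t.set i.toNat 1) || bruteB hint rest (t.set i.toNat (-1))

/-- agreement of two lists outside a set of (int) positions -/
def AgreeOff (el : List Int) (t t' : List Int) : Prop :=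
  t.length = t'.length ∧ ∀ j : Nat, j < t.length → (j : Int) ∉ el → t.getD j 0 = t'.getD j 0

/-- completions of t along positions el -/
def ExtAt (el : List Int) (t c : List Int) : Prop :=
  c.length = t.length ∧ ∀ j : Nat, j < t.length →
    (if (j : Int) ∈ el then c.getD j 0 = 1 ∨ c.getD j 0 = -1 else c.getD j 0 = t.getD j 0)

-- ---- small list facts ----

theorem getD_set (t : List Int) (n : Nat) (v : Int) (j : Nat) :
    (t.set n v).getD j 0 = if j = n ∧ j < t.length then v else t.getD j 0 := by
  simp [List.getD_eq_getElem?_getD, List.getElem?_set]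
  split_ifs with h1 h2 h3 <;> simp_all
  omega

-- ---- groups: pyGroups = gb ∘ ones ----

theorem takeRun_spec : ∀ b : List Bool,
    List.replicate (takeRun b).1 true ++ (takeRun b).2 = b ∧
    ((takeRun b).2 = [] ∨ ∃ r, (takeRun b).2 = false :: r) := by
  intro b; induction b with
  | nil => simp [takeRun]
  | cons x r ih => cases x <;> simp [takeRun, List.replicate_succ, ih.1] <;> exact ih.2

theorem takeRun_replicate : ∀ (m : Nat) (b : List Bool),
    takeRun (List.replicate m true ++ b) = ((m + (takeRun b).1, (takeRun b).2) : Nat × List Bool) := by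
  intro m; induction m with
  | zero => simp
  | succ m ih => intro b; simp [List.replicate_succ, takeRun, ih b]; omega

theorem gb_replicate (m : Nat) (hm : 1 ≤ m) : gb (List.replicate m true) = [(m : Int)] := by
  obtain ⟨m, rfl⟩ : ∃ k, m = k + 1 := ⟨m - 1, by omega⟩
  have h := takeRun_replicate m []
  simp [takeRun] at h
  simp [List.replicate_succ, gb, h]

theorem gb_replicate_false (m : Nat) (b : List Bool) (hm : 1 ≤ m) :
    gb (List.replicate m true ++ false :: b) = (m : Int) :: gb b := by
  obtain ⟨m, rfl⟩ : ∃ k, m = k + 1 := ⟨m - 1, by omega⟩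
  have h := takeRun_replicate m (false :: b)
  simp [takeRun] at h
  simp [List.replicate_succ, List.cons_append, gb, h]

def gstep (st : List Int × Int) (entry : Int) : List Int × Int :=
  if entry = 1 then (st.1, st.2 + 1)
  else if st.2 > 0 then (st.1 ++ [st.2], 0)
  else st

def gfin (st : List Int × Int) : List Int := if st.2 > 0 then st.1 ++ [st.2] else st.1

theorem fold_gb : ∀ (c : List Int) (gs : List Int) (cnt : Nat),
    gfin (c.foldl gstep (gs, (cnt : Int))) = gs ++ gb (List.replicate cnt true ++ ones c) := by
  intro c; induction c with
  | nil =>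
    intro gs cnt
    rcases Nat.eq_zero_or_pos cnt with h | h
    · simp [h, gb, gfin, ones]
    · have hpos : ((cnt : Int) > 0) := by exact_mod_cast h
      simp only [List.foldl_nil, ones, List.map_nil, List.append_nil, gfin]
      rw [gb_replicate cnt h]
      simp [hpos]
      omega
  | cons e c ih =>
    intro gs cnt
    by_cases he : e = 1
    · have : gstep (gs, (cnt : Int)) e = (gs, ((cnt + 1 : Nat) : Int)) := by
        simp [gstep, he]
      rw [List.foldl_cons, this, ih gs (cnt + 1)]
      simp [ones, he, List.replicate_succ']
    · rcases Nat.eq_zero_or_pos cnt with h | h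
      · subst h
        have : gstep (gs, ((0:Nat) : Int)) e = (gs, ((0:Nat) : Int)) := by simp [gstep, he]
        rw [List.foldl_cons, this, ih gs 0]
        simp [ones, he, gb]
      · have hpos : ((cnt : Int) > 0) := by exact_mod_cast h
        have : gstep (gs, (cnt : Int)) e = (gs ++ [(cnt:Int)], ((0:Nat) : Int)) := by
          simp [gstep, he, hpos]
          omega
        rw [List.foldl_cons, this, ih (gs ++ [(cnt : Int)]) 0]
        simp [ones, he, gb_replicate_false cnt _ h, gb]

theorem pyGroups_eq_gb (c : List Int) : pyGroups c = gb (ones c) := by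
  have := fold_gb c [] 0
  simpa [pyGroups, gfin, gstep] using this

-- ---- Adm facts ----

theorem Adm_length : ∀ (cs : List (Bool × Bool)) (b : List Bool), Adm cs b → b.length = cs.length := by
  intro cs; induction cs with
  | nil => intro b h; cases b with
    | nil => rfl
    | cons x b => exact absurd h (by simp [Adm])
  | cons c cs ih => intro b h; cases b with
    | nil => exact absurd h (by simp [Adm])
    | cons x b => simp only [Adm] at h; simp [ih b h.2]

theorem Adm_nil_iff (b : List Bool) : Adm [] b ↔ b = [] := by
  cases b <;> simp [Adm]

theorem Adm_index : ∀ (cs : List (Bool × Bool)) (b : List Bool),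
    Adm cs b ↔ b.length = cs.length ∧ ∀ j : Nat, j < cs.length →
      (if b.getD j false then (cs.getD j (false, false)).1 else (cs.getD j (false, false)).2) = true := by
  intro cs; induction cs with
  | nil => intro b; simp [Adm_nil_iff, List.length_eq_zero_iff]
  | cons c cs ih =>
    intro b; cases b with
    | nil => simp [Adm]
    | cons x b =>
      simp only [Adm, ih b, List.length_cons]
      constructor
      · rintro ⟨h1, h2, h3⟩
        refine ⟨by omega, ?_⟩
        intro j hj
        cases j with
        | zero => simpa using h1
        | succ j => simpa using h3 j (by omega)
      · rintro ⟨h1, h2⟩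
        refine ⟨by simpa using h2 0 (by omega), by omega, ?_⟩
        intro j hj
        simpa using h2 (j + 1) (by omega)

-- ---- A side: backtracking = brute = ∃ completion ----

theorem list_eq_of_getD {α : Type} (d : α) (t t' : List α) (hl : t.length = t'.length)
    (h : ∀ j : Nat, j < t.length → t.getD j d = t'.getD j d) : t = t' := by
  apply List.ext_getElem hl
  intro j h1 h2
  have := h j h1
  rwa [List.getD_eq_getElem _ _ h1, List.getD_eq_getElem _ _ h2] at this

theorem btA_eq_brute (hint : List Int) : ∀ (el : List Int) (t t' : List Int),
    (∀ i ∈ el, 0 ≤ i) → AgreeOff el t t' →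
    (btA hint el t).1 = bruteB hint el t' ∧ AgreeOff el t (btA hint el t).2 := by
  intro el; induction el with
  | nil =>
    intro t t' _ hag
    have : t = t' := list_eq_of_getD 0 t t' hag.1 (fun j hj => hag.2 j hj (by simp))
    subst this
    exact ⟨rfl, ⟨rfl, fun j hj _ => rfl⟩⟩
  | cons i el ih =>
    intro t t' hpos hag
    have h0i : 0 ≤ i := hpos i (by simp)
    have hlen : t.length = t'.length := hag.1
    have hji : ∀ j : Nat, (j : Int) ≠ i ↔ j ≠ i.toNat := by
      intro j; omega
    have hpos' : ∀ x ∈ el, (0:Int) ≤ x := fun x hx => hpos x (by simp [hx])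
    have hag1 : AgreeOff el (t.set i.toNat 1) (t'.set i.toNat 1) := by
      refine ⟨by simp [hlen], ?_⟩
      intro j hj hjel
      rw [List.length_set] at hj
      rw [getD_set, getD_set]
      by_cases hjn : j = i.toNat
      · rw [if_pos ⟨hjn, hj⟩, if_pos ⟨hjn, by omega⟩]
      · rw [if_neg (by tauto), if_neg (by tauto)]
        exact hag.2 j hj (by simp [hjel, (hji j).mpr hjn])
    obtain ⟨ih1, ih2⟩ := ih (t.set i.toNat 1) (t'.set i.toNat 1) hpos' hag1
    simp only [btA, bruteB, PySem.List.pySetD_of_nonneg _ _ h0i]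
    by_cases hr : (btA hint el (t.set i.toNat 1)).1 = true
    · rw [if_pos hr]
      have hb1 : bruteB hint el (t'.set i.toNat 1) = true := by rw [← ih1]; exact hr
      refine ⟨by simp [hb1], ⟨?_, ?_⟩⟩
      · have := ih2.1; simpa using this
      · intro j hj hjel
        have hjne : (j : Int) ≠ i := by intro hc; exact hjel (by simp [hc])
        have hjel' : (j : Int) ∉ el := fun hc => hjel (by simp [hc])
        have := (ih2.2 j (by simpa using hj) hjel').symm
        rw [this, getD_set, if_neg (by rw [hji] at hjne; tauto)]
    · rw [if_neg hr]
      simp only [Bool.not_eq_true] at hr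
      have hb1 : bruteB hint el (t'.set i.toNat 1) = false := by rw [← ih1]; exact hr
      have hr2len : (btA hint el (t.set i.toNat 1)).2.length = t.length := by
        have := ih2.1; simpa using this.symm
      have hag2 : AgreeOff el ((btA hint el (t.set i.toNat 1)).2.set i.toNat (-1))
          (t'.set i.toNat (-1)) := by
        refine ⟨by simp [hr2len, hlen], ?_⟩
        intro j hj hjel
        rw [List.length_set, hr2len] at hj
        rw [getD_set, getD_set]
        by_cases hjn : j = i.toNat
        · rw [if_pos ⟨hjn, by omega⟩, if_pos ⟨hjn, by omega⟩]
        · rw [if_neg (by tauto), if_neg (by tauto)]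
          have e1 := (ih2.2 j (by simpa using hj) hjel).symm
          rw [e1, getD_set, if_neg (by tauto)]
          exact hag.2 j hj (by simp [hjel, (hji j).mpr hjn])
      obtain ⟨ihb1, ihb2⟩ := ih _ _ hpos' hag2
      refine ⟨by rw [ihb1, hb1, Bool.false_or], ⟨?_, ?_⟩⟩
      · have := ihb2.1; simpa [hr2len] using this
      · intro j hj hjel
        have hjne : (j : Int) ≠ i := by intro hc; exact hjel (by simp [hc])
        have hjn : j ≠ i.toNat := (hji j).mp hjne
        have hjel' : (j : Int) ∉ el := fun hc => hjel (by simp [hc])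
        have e1 := (ihb2.2 j (by simp [hr2len, hj]) hjel').symm
        rw [e1, getD_set, if_neg (by tauto), (ih2.2 j (by simpa using hj) hjel').symm,
          getD_set, if_neg (by tauto)]

theorem ExtAt_cons (i : Int) (el : List Int) (t c : List Int) (h0 : 0 ≤ i)
    (hi : i.toNat < t.length) (hni : i ∉ el) :
    ExtAt (i :: el) t c ↔ ExtAt el (t.set i.toNat 1) c ∨ ExtAt el (t.set i.toNat (-1)) c := by
  have hcast : ((i.toNat : Nat) : Int) = i := Int.toNat_of_nonneg h0
  have hji : ∀ j : Nat, ((j : Int) = i) ↔ j = i.toNat := by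
    intro j; omega
  constructor
  · intro hext
    have hv := hext.2 i.toNat hi
    rw [if_pos (by simp [hcast])] at hv
    have build : ∀ v : Int, c.getD i.toNat 0 = v →
        ExtAt el (t.set i.toNat v) c := by
      intro v hval
      refine ⟨by simp [hext.1], ?_⟩
      intro j hj
      rw [List.length_set] at hj
      have horig := hext.2 j hj
      by_cases hjel : (j : Int) ∈ el
      · rw [if_pos hjel]
        rw [if_pos (by simp [hjel])] at horig
        exact horig
      · rw [if_neg hjel, getD_set]
        by_cases hjn : j = i.toNat
        · rw [if_pos ⟨hjn, hj⟩, hjn, hval]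
        · rw [if_neg (by tauto)]
          rw [if_neg (by simp [hjel]; omega)] at horig
          exact horig
    rcases hv with hv | hv
    · exact Or.inl (build 1 hv)
    · exact Or.inr (build (-1) hv)
  · have unbuild : ∀ v : Int, (v = 1 ∨ v = -1) → ExtAt el (t.set i.toNat v) c →
        ExtAt (i :: el) t c := by
      intro v hv hext
      refine ⟨by simpa using hext.1, ?_⟩
      intro j hj
      have horig := hext.2 j (by simpa using hj)
      by_cases hjel : (j : Int) ∈ (i :: el)
      · rw [if_pos hjel]
        rcases List.mem_cons.mp hjel with hj1 | hj2
        · rw [hji] at hj1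
          have hjnel : (j : Int) ∉ el := by rw [hj1, hcast]; exact hni
          rw [if_neg hjnel] at horig
          rw [getD_set, if_pos ⟨hj1, hj1 ▸ hi⟩] at horig
          rw [horig]; tauto
        · rw [if_pos hj2] at horig; exact horig
      · have hjel' : (j : Int) ∉ el := fun hc => hjel (by simp [hc])
        have hjn : j ≠ i.toNat := by
          intro hc; exact hjel (by simp [(hji j).mpr hc])
        rw [if_neg hjel]
        rw [if_neg hjel', getD_set, if_neg (by tauto)] at horig
        exact horig
    rintro (h | h)
    · exact unbuild 1 (Or.inl rfl) h
    · exact unbuild (-1) (Or.inr rfl) h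

theorem brute_iff (hint : List Int) : ∀ (el : List Int) (t : List Int),
    el.Nodup → (∀ i ∈ el, 0 ≤ i ∧ i < (t.length : Int)) →
    (bruteB hint el t = true ↔ ∃ c, ExtAt el t c ∧ pyGroups c = hint) := by
  intro el; induction el with
  | nil =>
    intro t _ _
    simp only [bruteB, matchHint, decide_eq_true_eq]
    constructor
    · intro h
      exact ⟨t, ⟨rfl, fun j hj => by simp⟩, h⟩
    · rintro ⟨c, hext, hg⟩
      have : c = t := list_eq_of_getD 0 c t (by simpa using hext.1)
        (fun j hj => by simpa using hext.2 j (by rw [← hext.1]; exact hj))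
      rwa [this] at hg
  | cons i el ih =>
    intro t hnd hbnd
    have h0i : 0 ≤ i := (hbnd i (by simp)).1
    have hi : i.toNat < t.length := by
      have := (hbnd i (by simp)).2; omega
    have hnd' : el.Nodup := (List.nodup_cons.mp hnd).2
    have hni : i ∉ el := (List.nodup_cons.mp hnd).1
    have hbnd' : ∀ v : Int, ∀ x ∈ el, 0 ≤ x ∧ x < ((t.set i.toNat v).length : Int) := by
      intro v x hx
      have := hbnd x (by simp [hx])
      simpa using this
    simp only [bruteB, Bool.or_eq_true, ih _ hnd' (hbnd' 1), ih _ hnd' (hbnd' (-1))]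
    constructor
    · rintro (⟨c, hc, hg⟩ | ⟨c, hc, hg⟩)
      · exact ⟨c, (ExtAt_cons i el t c h0i hi hni).mpr (Or.inl hc), hg⟩
      · exact ⟨c, (ExtAt_cons i el t c h0i hi hni).mpr (Or.inr hc), hg⟩
    · rintro ⟨c, hc, hg⟩
      rcases (ExtAt_cons i el t c h0i hi hni).mp hc with h | h
      · exact Or.inl ⟨c, h, hg⟩
      · exact Or.inr ⟨c, h, hg⟩

-- ---- bridge: completions of t2 ↔ admissible one-patterns of cellsOfA ----

theorem mem_emptyList (t2 : List Int) (length : Int) (hlen : length ≤ (t2.length : Int)) (j : Nat)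
    (hj : j < t2.length) :
    ((j : Int) ∈ pyEmptyList t2 length) ↔ ((j : Int) < length ∧ t2.getD j 0 = 0) := by
  simp only [pyEmptyList, List.mem_filter, PySem.List.mem_pyRange_one,
    PySem.List.pyGetD_natCast, beq_iff_eq]
  constructor
  · rintro ⟨⟨_, h1⟩, h2⟩; exact ⟨h1, h2⟩
  · rintro ⟨h1, h2⟩; exact ⟨⟨by omega, h1⟩, h2⟩

theorem emptyList_nodup (t2 : List Int) (length : Int) : (pyEmptyList t2 length).Nodup := by
  apply List.Nodup.filter
  rw [PySem.List.pyRange_one]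
  exact (List.nodup_range).map (fun a b hab => by omega)

theorem emptyList_bounds (t2 : List Int) (length : Int) (hlen : length ≤ (t2.length : Int)) :
    ∀ i ∈ pyEmptyList t2 length, 0 ≤ i ∧ i < (t2.length : Int) := by
  intro i hi
  rcases List.mem_filter.mp hi with ⟨hr, _⟩
  rcases PySem.List.mem_pyRange_one.mp hr with ⟨h1, h2⟩
  exact ⟨h1, by omega⟩

theorem cellsOfA_length (t2 : List Int) (length : Int) :
    (cellsOfA t2 length).length = t2.length := by simp [cellsOfA]

theorem cellsOfA_getD (t2 : List Int) (length : Int) (j : Nat) (hj : j < t2.length) :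
    (cellsOfA t2 length).getD j (false, false) =
      (decide ((j : Int) < length ∧ t2.getD j 0 = 0) || decide (t2.getD j 0 = 1),
       decide ((j : Int) < length ∧ t2.getD j 0 = 0) || decide (t2.getD j 0 ≠ 1)) := by
  rw [List.getD_eq_getElem _ _ (by rw [cellsOfA_length]; omega)]
  simp [cellsOfA, List.getElem_zipIdx, List.getD_eq_getElem?_getD, List.getElem?_eq_getElem hj]

theorem ext_iff_adm (hint : List Int) (t2 : List Int) (length : Int)
    (hlen : length ≤ (t2.length : Int)) :
    (∃ c, ExtAt (pyEmptyList t2 length) t2 c ∧ pyGroups c = hint) ↔ Ex (cellsOfA t2 length) hint := by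
  constructor
  · rintro ⟨c, hext, hg⟩
    have hclen2 : c.length = t2.length := hext.1
    refine ⟨ones c, ?_, by rw [← pyGroups_eq_gb, hg]⟩
    rw [Adm_index]
    refine ⟨by simp [ones, cellsOfA_length, hclen2], ?_⟩
    intro j hj
    rw [cellsOfA_length] at hj
    have hjc : j < c.length := by omega
    have hones : (ones c).getD j false = decide (c.getD j 0 = 1) := by
      simp only [ones]
      rw [List.getD_eq_getElem _ _ (by simpa using hjc), List.getElem_map,
        ← List.getD_eq_getElem c 0 hjc]
    rw [cellsOfA_getD t2 length j hj, hones]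
    have horig := hext.2 j hj
    simp only [mem_emptyList t2 length hlen j hj] at horig
    by_cases hfree : ((j : Int) < length ∧ t2.getD j 0 = 0)
    · split_ifs <;> simp [hfree.1, show t2[j]?.getD 0 = 0 from hfree.2]
    · rw [if_neg hfree] at horig
      split_ifs with hq
      · have h2 : t2.getD j 0 = 1 := by rw [← horig]; exact of_decide_eq_true hq
        simp [show t2[j]?.getD 0 = 1 from h2]
      · have hq' : c.getD j 0 ≠ 1 := by simpa using hq
        have h2 : t2.getD j 0 ≠ 1 := horig ▸ hq'
        simp [show ¬ t2[j]?.getD 0 = 1 from h2]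
  · rintro ⟨b, hAdm, hgb⟩
    rw [Adm_index] at hAdm
    obtain ⟨hblen, hbj⟩ := hAdm
    rw [cellsOfA_length] at hblen
    set c : List Int := t2.zipIdx.map (fun ej =>
      if ((ej.2 : Int) < length ∧ ej.1 = 0) then (if b.getD ej.2 false then (1 : Int) else -1)
      else ej.1) with hc
    have hclen2 : c.length = t2.length := by simp [hc]
    have hcj : ∀ j : Nat, j < t2.length → c.getD j 0 =
        if ((j : Int) < length ∧ t2.getD j 0 = 0) then (if b.getD j false then 1 else -1)
        else t2.getD j 0 := by
      intro j hj
      rw [List.getD_eq_getElem _ _ (by omega)]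
      simp [hc, List.getElem_zipIdx, List.getD_eq_getElem?_getD, List.getElem?_eq_getElem hj]
    have hcells : ∀ j : Nat, j < t2.length →
        (if b.getD j false
          then decide ((j : Int) < length ∧ t2.getD j 0 = 0) || decide (t2.getD j 0 = 1)
          else decide ((j : Int) < length ∧ t2.getD j 0 = 0) || decide (t2.getD j 0 ≠ 1)) = true := by
      intro j hj
      have := hbj j (by rw [cellsOfA_length]; omega)
      rwa [cellsOfA_getD t2 length j hj] at this
    have honesb : ones c = b := by
      apply list_eq_of_getD false _ _ (by simp [ones, hclen2, hblen])
      intro j hj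
      simp only [ones, List.length_map] at hj
      have hjt : j < t2.length := by omega
      have hones : (ones c).getD j false = decide (c.getD j 0 = 1) := by
        simp only [ones]
        rw [List.getD_eq_getElem _ _ (by simpa using hj), List.getElem_map,
          ← List.getD_eq_getElem c 0 hj]
      rw [hones, hcj j hjt]
      have hcl := hcells j hjt
      by_cases hfree : ((j : Int) < length ∧ t2.getD j 0 = 0)
      · rw [if_pos hfree]
        cases hb : b.getD j false <;> simp
      · rw [if_neg hfree]
        have hdecf : decide ((j : Int) < length ∧ t2.getD j 0 = 0) = false :=
          decide_eq_false hfree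
        cases hb : b.getD j false
        · rw [hb] at hcl
          rw [if_neg (by simp)] at hcl
          rw [hdecf, Bool.false_or] at hcl
          have h2 : t2.getD j 0 ≠ 1 := of_decide_eq_true hcl
          simp [show ¬ t2[j]?.getD 0 = 1 from h2]
        · rw [hb] at hcl
          rw [if_pos rfl] at hcl
          rw [hdecf, Bool.false_or] at hcl
          have h2 : t2.getD j 0 = 1 := of_decide_eq_true hcl
          simp [show t2[j]?.getD 0 = 1 from h2]
    refine ⟨c, ⟨hclen2, ?_⟩, by rw [pyGroups_eq_gb, honesb, hgb]⟩
    intro j hj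
    simp only [mem_emptyList t2 length hlen j hj]
    rw [hcj j hj]
    by_cases hfree : ((j : Int) < length ∧ t2.getD j 0 = 0)
    · rw [if_pos hfree, if_pos hfree]
      cases b.getD j false <;> simp
    · rw [if_neg hfree, if_neg hfree]

theorem cellsOfA_set (t : List Int) (length i v : Int) (h0 : 0 ≤ i) (hi : i < length)
    (hlen : length ≤ (t.length : Int)) (hv : v = 1 ∨ v = -1) :
    cellsOfA (PySem.List.pySetD t i v) length = feasCells t length i v := by
  rw [PySem.List.pySetD_of_nonneg _ _ h0]
  have hv0 : v ≠ 0 := by rcases hv with h | h <;> simp [h]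
  apply List.ext_getElem (by simp [cellsOfA, feasCells])
  intro j h1 h2
  have hjt : j < t.length := by simpa [cellsOfA] using h1
  simp only [cellsOfA, feasCells, List.getElem_map, List.getElem_zipIdx, List.getElem_set]
  by_cases hji : i.toNat = j
  · have hjiI : ((j : Int)) = i := by omega
    simp [hji, hjiI, hv0]
  · have hjiI : ((j : Int)) ≠ i := by omega
    simp [hji, hjiI]



-- ---- outer fold ----

theorem Adm_append_iff : ∀ (b1 : List Bool) (cs : List (Bool × Bool)) (b2 : List Bool),
    Adm cs (b1 ++ b2) ↔
      (b1.length ≤ cs.length ∧ Adm (cs.take b1.length) b1 ∧ Adm (cs.drop b1.length) b2) := by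
  intro b1; induction b1 with
  | nil => intro cs b2; simp [Adm]
  | cons x b1 ih =>
    intro cs b2; cases cs with
    | nil => simp [Adm]
    | cons c cs => simp [Adm, ih cs b2]; tauto
  -- note: may need omega for length arith

theorem Adm_nil_right_iff (cs : List (Bool × Bool)) : Adm cs [] ↔ cs = [] := by
  cases cs <;> simp [Adm]

theorem Adm_replicate : ∀ cs : List (Bool × Bool),
    Adm cs (List.replicate cs.length true) ↔ cs.all (fun x => x.1) = true := by
  intro cs; induction cs with
  | nil => simp [Adm]
  | cons c cs ih => simp [Adm, List.replicate_succ, ih]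

theorem drop_eq_getD_cons (cs : List (Bool × Bool)) (m : Nat) (h : m < cs.length) :
    cs.drop m = cs.getD m (false, false) :: cs.drop (m + 1) := by
  rw [List.drop_eq_getElem_cons h, List.getD_eq_getElem cs (false, false) h]

theorem ex_cons (c : Bool × Bool) (rest : List (Bool × Bool)) (hs : List Int) :
    Ex (c :: rest) hs ↔
      (c.2 = true ∧ Ex rest hs) ∨
      (∃ (m : Nat) (hs' : List Int), hs = ((m : Nat) : Int) :: hs' ∧ 1 ≤ m ∧ m ≤ rest.length + 1 ∧
        (((c :: rest).take m).all (fun x => x.1)) = true ∧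
        ((m = rest.length + 1 ∧ hs' = []) ∨
         (m ≤ rest.length ∧ ((c :: rest).getD m (false, false)).2 = true ∧
           Ex ((c :: rest).drop (m + 1)) hs'))) := by
  constructor
  · rintro ⟨b, hAdm, hgb⟩
    have hlen := Adm_length _ _ hAdm
    cases b with
    | nil => simp at hlen
    | cons x b' =>
      cases x
      · left
        simp only [Adm] at hAdm
        exact ⟨hAdm.1, b', hAdm.2, by simpa [gb] using hgb⟩
      · right
        obtain ⟨hrep, hsnd⟩ := takeRun_spec b'
        have hb : true :: b' = List.replicate ((takeRun b').1 + 1) true ++ (takeRun b').2 := by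
          rw [List.replicate_succ, List.cons_append, hrep]
        have hgb' : gb (true :: b') = (((takeRun b').1 + 1 : Nat) : Int) :: gb (takeRun b').2 := by
          simp [gb]
        have hlb : b'.length = (takeRun b').1 + (takeRun b').2.length := by
          have := congrArg List.length hrep; simpa using this.symm
        rw [hb] at hAdm
        rw [Adm_append_iff] at hAdm
        obtain ⟨hle, htake, hdrop⟩ := hAdm
        simp only [List.length_replicate] at hle htake hdrop
        have hall : (((c :: rest).take ((takeRun b').1 + 1)).all (fun x => x.1)) = true := by
          have := (Adm_replicate ((c :: rest).take ((takeRun b').1 + 1))).mp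
          rw [List.length_take] at this
          rw [min_eq_left hle] at this
          exact this htake
        refine ⟨(takeRun b').1 + 1, gb (takeRun b').2, by rw [← hgb, hgb'], by omega,
          by simpa using hle, hall, ?_⟩
        rcases hsnd with h2 | ⟨r, h2⟩
        · left
          have : (takeRun b').1 + 1 = rest.length + 1 := by
            simp [h2] at hlb; simp at hlen; omega
          exact ⟨this, by simp [h2, gb]⟩
        · right
          have hlt : (takeRun b').1 + 1 ≤ rest.length := by
            have := congrArg List.length h2; simp at this hlen; omega
          rw [drop_eq_getD_cons _ _ (by simp; omega), h2] at hdrop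
          simp only [Adm] at hdrop
          exact ⟨hlt, hdrop.1, r, hdrop.2, by simp [h2, gb]⟩
  · rintro (⟨hc, b, hAdm, hgb⟩ | ⟨m, hs', rfl, hm1, hmle, hall, hrest⟩)
    · exact ⟨false :: b, by simp [Adm, hc, hAdm], by simpa [gb] using hgb⟩
    · rcases hrest with ⟨hmeq, rfl⟩ | ⟨hmle', hblank, b₂, hAdm₂, hgb₂⟩
      · refine ⟨List.replicate m true, ?_, by simpa [gb_replicate m hm1] using rfl⟩
        have : List.replicate m true = List.replicate m true ++ ([] : List Bool) := by simp
        rw [this, Adm_append_iff]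
        refine ⟨by simp; omega, ?_, ?_⟩
        · simp only [List.length_replicate]
          have := (Adm_replicate ((c :: rest).take m)).mpr hall
          rwa [List.length_take, min_eq_left (by simp; omega)] at this
        · rw [Adm_nil_right_iff]
          simp only [List.length_replicate]
          apply List.drop_eq_nil_of_le
          simp; omega
      · refine ⟨List.replicate m true ++ false :: b₂, ?_, by rw [gb_replicate_false m _ hm1, hgb₂]⟩
        rw [Adm_append_iff]
        refine ⟨by simp; omega, ?_, ?_⟩
        · simp only [List.length_replicate]
          have := (Adm_replicate ((c :: rest).take m)).mpr hall
          rwa [List.length_take, min_eq_left (by simp; omega)] at this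
        · simp only [List.length_replicate]
          rw [drop_eq_getD_cons _ _ (by simp; omega)]
          exact ⟨hblank, hAdm₂⟩

theorem headD_rowsB (hint : List Int) (H : Nat) (cs : List (Bool × Bool)) :
    (rowsB hint H cs).headD [] = (rowsB hint H cs).getD 0 [] := by
  cases cs <;> simp [rowsB]

theorem ex_nil_iff (hs : List Int) : Ex [] hs ↔ hs = [] := by
  constructor
  · rintro ⟨b, hAdm, hgb⟩
    rw [Adm_nil_iff] at hAdm
    subst hAdm; simpa [gb] using hgb.symm
  · rintro rfl; exact ⟨[], by simp [Adm], by simp [gb]⟩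

theorem rowsB_spec (hint : List Int) : ∀ (cs : List (Bool × Bool)) (d k : Nat),
    d ≤ cs.length → k ≤ hint.length →
    ((((rowsB hint hint.length cs).getD d []).getD k false) = true ↔ Ex (cs.drop d) (hint.drop k)) := by
  intro cs; induction cs with
  | nil =>
    intro d k hd hk
    have hd0 : d = 0 := by simpa using hd
    subst hd0
    simp only [rowsB, List.getD_cons_zero, List.drop_nil]
    rw [PySem.List.getD_map_range _ _ _ _ (by omega)]
    rw [ex_nil_iff, List.drop_eq_nil_iff]
    simp; omega
  | cons c rest ih =>
    intro d k hd hk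
    cases d with
    | succ d =>
      simp only [rowsB, List.getD_cons_succ, List.drop_succ_cons]
      exact ih d k (by simpa using hd) hk
    | zero =>
      simp only [rowsB, List.getD_cons_zero, List.drop_zero]
      rw [PySem.List.getD_map_range _ _ _ _ (by omega)]
      rw [headD_rowsB]
      set okb := c.2 && ((rowsB hint hint.length rest).getD 0 []).getD k false with hokb
      have hok : okb = true ↔ (c.2 = true ∧ Ex rest (hint.drop k)) := by
        rw [hokb, Bool.and_eq_true, ih 0 k (by omega) hk, List.drop_zero]
      rw [ex_cons]
      by_cases hkH : k < hint.length
      · simp only [hkH, decide_true, Bool.and_true]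
        by_cases hox : okb = true
        · simp only [hox, Bool.not_true, Bool.false_eq_true, if_false]
          exact iff_of_true trivial (Or.inl (hok.mp hox))
        · simp only [Bool.not_eq_true] at hox
          simp only [hox, Bool.not_false, if_true]
          have hnotleft : ¬ (c.2 = true ∧ Ex rest (hint.drop k)) := by
            intro hcontra; rw [← hok] at hcontra; simp [hox] at hcontra
          rw [or_iff_right hnotleft]
          rw [PySem.List.pyGetD_natCast]
          have hdk : hint.drop k = hint.getD k 0 :: hint.drop (k + 1) := by
            rw [List.getD_eq_getElem hint 0 hkH]; exact List.drop_eq_getElem_cons hkH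
          have hforce : ∀ (m : Nat) (hs' : List Int), hint.drop k = ((m : Nat) : Int) :: hs' →
              ((m : Nat) : Int) = hint.getD k 0 ∧ hs' = hint.drop (k + 1) := by
            intro m hs' heq
            rw [hdk] at heq
            exact ⟨(List.cons.injEq _ _ _ _ ▸ heq).1.symm, ((List.cons.injEq _ _ _ _ ▸ heq)).2.symm⟩
          constructor
          · intro hblk
            split_ifs at hblk with hcond hnj
            · have hc := Bool.and_eq_true_iff.mp hcond
              have hc1 : (1 : Int) ≤ hint.getD k 0 := by
                have := Bool.and_eq_true_iff.mp hc.1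
                simpa using this.1
              have hc2 : hint.getD k 0 ≤ (rest.length : Int) + 1 := by
                have := Bool.and_eq_true_iff.mp hc.1
                simpa using this.2
              have hall : (((c :: rest).take (hint.getD k 0).toNat).all (fun x => x.1)) = true := hc.2
              set m := (hint.getD k 0).toNat with hm
              have hcast : ((m : Nat) : Int) = hint.getD k 0 := Int.toNat_of_nonneg (by omega)
              refine ⟨m, hint.drop (k + 1), by rw [hdk, hcast], by omega, by omega, hall, ?_⟩
              left
              have hmeq : m = rest.length + 1 := by
                have : ((m : Nat) : Int) = (rest.length : Int) + 1 := by rw [hcast]; exact_mod_cast hnj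
                exact_mod_cast this
              refine ⟨hmeq, ?_⟩
              rw [List.drop_eq_nil_iff]
              have : k + 1 = hint.length := by simpa using hblk
              omega
            · have hc := Bool.and_eq_true_iff.mp hcond
              have hc1 : (1 : Int) ≤ hint.getD k 0 := by
                have := Bool.and_eq_true_iff.mp hc.1
                simpa using this.1
              have hc2 : hint.getD k 0 ≤ (rest.length : Int) + 1 := by
                have := Bool.and_eq_true_iff.mp hc.1
                simpa using this.2
              have hall : (((c :: rest).take (hint.getD k 0).toNat).all (fun x => x.1)) = true := hc.2
              set m := (hint.getD k 0).toNat with hm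
              have hcast : ((m : Nat) : Int) = hint.getD k 0 := Int.toNat_of_nonneg (by omega)
              have hmlt : m ≤ rest.length := by
                have hne : ((m : Nat) : Int) ≠ (rest.length : Int) + 1 := by rw [hcast]; exact_mod_cast hnj
                have : (m : Int) ≤ (rest.length : Int) + 1 := by rw [hcast]; exact_mod_cast hc2
                omega
              have hbp := Bool.and_eq_true_iff.mp hblk
              refine ⟨m, hint.drop (k + 1), by rw [hdk, hcast], by omega, by omega, hall, ?_⟩
              right
              refine ⟨hmlt, hbp.1, ?_⟩
              have := (ih m (k + 1) hmlt (by omega)).mp hbp.2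
              simpa [List.drop_succ_cons] using this
          · rintro ⟨m, hs', heq, hm1, hmle, hall, hinner⟩
            obtain ⟨hmh, rfl⟩ := hforce m hs' heq
            have htn : (hint.getD k 0).toNat = m := by rw [← hmh]; exact Int.toNat_natCast m
            have hg1 : decide ((1:Int) ≤ hint.getD k 0) = true := by
              rw [← hmh]; simp; omega
            have hg2 : decide (hint.getD k 0 ≤ (rest.length : Int) + 1) = true := by
              rw [← hmh]; simp; omega
            rw [htn]
            rw [if_pos (by rw [hg1, hg2, hall]; rfl)]
            rcases hinner with ⟨hmeq, hnil⟩ | ⟨hmle', hblank, hex⟩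
            · rw [if_pos (by rw [← hmh]; exact_mod_cast congrArg (fun x => ((x:Nat):Int)) hmeq)]
              rw [List.drop_eq_nil_iff] at hnil
              simp; omega
            · rw [if_neg (by rw [← hmh]; intro hcon; have : m = rest.length + 1 := by exact_mod_cast hcon
                             omega)]
              rw [Bool.and_eq_true_iff]
              refine ⟨hblank, ?_⟩
              rw [ih m (k + 1) hmle' (by omega)]
              simpa [List.drop_succ_cons] using hex
      · have hdrop : hint.drop k = [] := by simp; omega
        simp only [hkH, decide_false, Bool.and_false, Bool.false_eq_true, if_false]
        rw [hok, hdrop]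
        constructor
        · intro h; exact Or.inl h
        · rintro (h | ⟨m, hs', heq, _⟩)
          · exact h
          · exact absurd heq (by simp)

theorem solvable_eq_feasible (hint : List Int) (t : List Int) (length i v : Int)
    (h0 : 0 ≤ i) (hi : i < length) (hlen : length ≤ (t.length : Int)) (hv : v = 1 ∨ v = -1) :
    pySolvable hint (PySem.List.pySetD t i v) length = feasible hint t length i v := by
  set t2 := PySem.List.pySetD t i v with ht2
  have ht2len : t2.length = t.length := by
    rw [ht2, PySem.List.pySetD_of_nonneg _ _ h0]; simp
  have hlen2 : length ≤ (t2.length : Int) := by rw [ht2len]; exact hlen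
  have hA : pySolvable hint t2 length = true ↔ Ex (cellsOfA t2 length) hint := by
    rw [pySolvable]
    rw [(btA_eq_brute hint (pyEmptyList t2 length) t2 t2
      (fun x hx => (emptyList_bounds t2 length hlen2 x hx).1)
      ⟨rfl, fun j hj _ => rfl⟩).1]
    rw [brute_iff hint (pyEmptyList t2 length) t2 (emptyList_nodup t2 length)
      (emptyList_bounds t2 length hlen2)]
    exact ext_iff_adm hint t2 length hlen2
  have hB : feasible hint t length i v = true ↔ Ex (cellsOfA t2 length) hint := by
    rw [feasible, headD_rowsB]
    have := rowsB_spec hint (feasCells t length i v) 0 0 (by omega) (by omega)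
    rw [this]
    rw [ht2, cellsOfA_set t length i v h0 hi hlen hv]
    simp
  have hiff := hA.trans hB.symm
  cases h1 : pySolvable hint t2 length <;> cases h2 : feasible hint t length i v
  · rfl
  · exact absurd (hiff.mpr h2) (by simp [h1])
  · exact absurd (hiff.mp h1) (by simp [h2])
  · rfl

theorem foldl_eq_inv {α β : Type} (P : α → Prop) (f g : α → β → α) :
    ∀ (l : List β) (a : α), P a → (∀ a x, P a → x ∈ l → P (f a x)) →
    (∀ a x, P a → x ∈ l → f a x = g a x) → l.foldl f a = l.foldl g a := by
  intro l; induction l with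
  | nil => intro a _ _ _; rfl
  | cons x l ih =>
    intro a hPa hpres hagree
    simp only [List.foldl_cons]
    rw [← hagree a x hPa (by simp)]
    exact ih (f a x) (hpres a x hPa (by simp)) (fun a y hy hm => hpres a y hy (by simp [hm]))
      (fun a y hy hm => hagree a y hy (by simp [hm]))

-- ===== VERDICT (by name: the statement is the Claim_ definition above) =====
theorem exclude_spec : Claim_equal_exclude := by
  intro hint temp length _ hpre
  show exclude hint temp length = exclude_alt hint temp length
  unfold exclude exclude_alt pyEmptyList
  apply foldl_eq_inv (fun t => t.length = temp.length)
  · rfl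
  · intro a x hPa hx
    split_ifs <;> simp [PySem.List.length_pySetD, hPa]
  · intro a x hPa hx
    have hx' : (0 : Int) ≤ x ∧ x < length := by
      rcases List.mem_filter.mp hx with ⟨hr, _⟩
      exact PySem.List.mem_pyRange_one.mp hr
    have hlen : length ≤ (a.length : Int) := by
      have : (a.length : Int) = (temp.length : Int) := by exact_mod_cast hPa
      rw [this]; exact hpre
    rw [solvable_eq_feasible hint a length x 1 hx'.1 hx'.2 hlen (Or.inl rfl),
      solvable_eq_feasible hint a length x (-1) hx'.1 hx'.2 hlen (Or.inr rfl)]
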